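-- pv_equiv track=rewrite | github.com/omarrules100/state_table_minimization | modules/meisels_method.py | requirementToPrimeCompatiblesDict
-- ===== SOURCE A (Python) =====
-- def listToString(alist):
--     myString = ""
--     if (len(alist) != 0):
--         for item in alist:
--             myString = myString + item + ','
--         myString = myString[:-1]
--     return myString
--
-- def requirementToPrimeCompatiblesDict(prime_compatibles):
--     #make a list of compatibles without duplicates or empty
--     requirements = []
--
--     #collapses 2d array into 1d array of strings and excludes empty lists
--     for req_list in (list(prime_compatibles.values())):
--         if len(req_list) != 0:
--             for req in req_list:
--                 if req not in requirements:
--                     requirements.append(req)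
--
--     #using list of requirements, create dict with requirement as key to access
--     #list of prime compatibles that meet it
--     requirement_prime_compatibles = {}
--     for req in requirements:
--         tempPCList = []
--         for PC in list(prime_compatibles.keys()):
--             if all(state in PC for state in req): #if req is in PC
--                 PC = PC.replace("[", "")
--                 PC = PC.replace("]", "")
--                 PC = PC.replace(" ", "")
--                 PC = PC.split(",")
--                 tempPCList.append(PC)
--         requirement_prime_compatibles[listToString(req)] = tempPCList
--     return requirement_prime_compatibles
-- ===== SOURCE B (Python) =====
-- def listToString(alist):
--     myString = ""
--     if (len(alist) != 0):
--         for item in alist: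
--             myString = myString + item + ','
--         myString = myString[:-1]
--     return myString
--
-- def _cleanKey(key):
--     return key.replace("[", "").replace("]", "").replace(" ", "").split(",")
--
-- def requirementToPrimeCompatiblesDict(prime_compatibles):
--     keys = list(prime_compatibles.keys())
--     # ordered dedup of all requirements
--     seen = set()
--     requirements = []
--     for req_list in prime_compatibles.values():
--         for req in req_list:
--             t = tuple(req)
--             if t not in seen:
--                 seen.add(t)
--                 requirements.append(req)
--     # inverted index: each DISTINCT state is substring-tested against each key once
--     occ = {}
--     for req in requirements:
--         for state in req:
--             if state not in occ:
--                 occ[state] = {k for k in keys if state in k}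
--     # each requirement's prime compatibles = progressive intersection of its states' key sets
--     result = {}
--     for req in requirements:
--         cand = keys
--         for state in req:
--             s = occ[state]
--             cand = [k for k in cand if k in s]
--         result[listToString(req)] = [_cleanKey(k) for k in cand]
--     return result
-- ===== Notes on version B (the rewrite author's own statement) =====
-- stated objective: faster
-- what changed: B replaces A's per-(requirement,key) nested matching with an inverted index: each distinct state is substring-tested against each key exactly once and memoized as a set of keys, and each requirement's bucket is then computed by progressively intersecting (filtering) the key list through its states' index sets, cleaning only the surviving keys at the end.
import Mathlib
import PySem

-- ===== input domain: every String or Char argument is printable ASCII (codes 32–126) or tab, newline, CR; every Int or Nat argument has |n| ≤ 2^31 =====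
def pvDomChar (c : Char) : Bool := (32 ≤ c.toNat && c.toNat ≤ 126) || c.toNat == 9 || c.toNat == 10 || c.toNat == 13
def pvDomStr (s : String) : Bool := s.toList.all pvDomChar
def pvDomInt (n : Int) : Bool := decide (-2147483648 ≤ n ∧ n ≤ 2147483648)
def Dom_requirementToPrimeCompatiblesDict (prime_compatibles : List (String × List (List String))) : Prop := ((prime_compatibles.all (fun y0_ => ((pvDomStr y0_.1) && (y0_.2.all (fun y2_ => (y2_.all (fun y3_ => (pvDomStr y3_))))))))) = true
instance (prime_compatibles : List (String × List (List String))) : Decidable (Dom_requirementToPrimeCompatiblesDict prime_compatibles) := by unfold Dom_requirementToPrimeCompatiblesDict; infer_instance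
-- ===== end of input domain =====

-- B is a different algorithm: it builds an inverted index (each distinct state substring-tested
-- against each key once) and computes each requirement's bucket by progressively filtering the
-- key list through the index, instead of A's per-(requirement,key) direct test; same return value.


-- ===== PORT A =====
-- helper listToString: Python's listToString, on char lists (String.ofList wraps the result)
def listToString (alist : List String) : String :=
  let myString : List Char := []
  if alist.length ≠ 0 then
    let r := alist.foldl (fun acc item => acc ++ item.toList ++ [',']) myString
    String.ofList (PySem.Chars.slice r none (some (-1)))
  else String.ofList myString

-- literal transliteration of A: dedup requirements by list membership, then for each
-- requirement rescan all keys, cleaning/splitting each matching key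
def requirementToPrimeCompatiblesDict (prime_compatibles : List (String × List (List String))) : List (String × List (List String)) :=
  let requirements : List (List String) :=
    (prime_compatibles.map (·.2)).foldl (fun requirements req_list =>
      if req_list.length ≠ 0 then
        req_list.foldl (fun requirements req =>
          if requirements.contains req then requirements else requirements ++ [req]) requirements
      else requirements) []
  let d : PySem.Dict String (List (List String)) :=
    requirements.foldl (fun d req =>
      let tempPCList : List (List String) :=
        (prime_compatibles.map (·.1)).foldl (fun tempPCList PC =>
          if req.all (fun state => PySem.Str.isIn state PC) then
            let PC1 := PySem.Str.replace PC "[" ""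
            let PC2 := PySem.Str.replace PC1 "]" ""
            let PC3 := PySem.Str.replace PC2 " " ""
            let PCs := (PySem.Chars.splitOn PC3.toList [',']).map String.ofList
            tempPCList ++ [PCs]
          else tempPCList) []
      d.insert (listToString req) tempPCList) PySem.Dict.empty
  d.items

-- ===== PORT B =====
-- B's helper _cleanKey: parse a key
def cleanKey (key : String) : List String :=
  (PySem.Chars.splitOn
    (PySem.Str.replace (PySem.Str.replace (PySem.Str.replace key "[" "") "]" "") " " "").toList
    [',']).map String.ofList

-- literal transliteration of B: dedup with a set; build the inverted index occ
-- (state -> set of keys containing it, each distinct state tested once); then each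
-- requirement's candidates are the keys filtered through its states' index sets.
-- 'occ[state]' (never missing by construction) is ported as get? … |>.getD ∅.
def requirementToPrimeCompatiblesDict_alt (prime_compatibles : List (String × List (List String))) : List (String × List (List String)) :=
  let keys := prime_compatibles.map (·.1)
  let p : PySem.Set (List String) × List (List String) :=
    (prime_compatibles.map (·.2)).foldl (fun p req_list =>
      req_list.foldl (fun p req =>
        if PySem.Set.contains p.1 req then p else (PySem.Set.add p.1 req, p.2 ++ [req])) p)
      (PySem.Set.empty, [])
  let requirements := p.2
  let occ : PySem.Dict String (PySem.Set String) :=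
    requirements.foldl (fun occ req =>
      req.foldl (fun occ state =>
        if (occ.get? state).isSome then occ
        else occ.insert state (PySem.Set.ofList (keys.filter (fun k => PySem.Str.isIn state k)))) occ)
      PySem.Dict.empty
  let d : PySem.Dict String (List (List String)) :=
    requirements.foldl (fun d req =>
      let cand := req.foldl (fun cand state =>
        let s := (occ.get? state).getD PySem.Set.empty
        cand.filter (fun k => PySem.Set.contains s k)) keys
      d.insert (listToString req) (cand.map cleanKey)) PySem.Dict.empty
  d.items

-- ===== PRECONDITION & SPEC =====
def Spec_requirementToPrimeCompatiblesDict (prime_compatibles : List (String × List (List String))) (out : List (String × List (List String))) : Prop := out = requirementToPrimeCompatiblesDict_alt prime_compatibles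
instance (prime_compatibles : List (String × List (List String))) (out : List (String × List (List String))) : Decidable (Spec_requirementToPrimeCompatiblesDict prime_compatibles out) := by unfold Spec_requirementToPrimeCompatiblesDict; infer_instance

-- ===== CLAIM =====
def Claim_equal_requirementToPrimeCompatiblesDict : Prop := ∀ (prime_compatibles : List (String × List (List String))), Dom_requirementToPrimeCompatiblesDict prime_compatibles → Spec_requirementToPrimeCompatiblesDict prime_compatibles (requirementToPrimeCompatiblesDict prime_compatibles)

-- ===== LEMMAS AND PROOFS =====

-- the canonical index set of one state
def canonS (keys : List String) (state : String) : PySem.Set String :=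
  PySem.Set.ofList (keys.filter (fun k => PySem.Str.isIn state k))

-- B's (seen, requirements) pair: the set mirrors the list, and the list is A's dedup list
theorem dedup_pair_eq (lss : List (List (List String))) (acc : List (List String)) :
    lss.foldl (fun p req_list =>
      req_list.foldl (fun p req =>
        if PySem.Set.contains p.1 req then p else (PySem.Set.add p.1 req, p.2 ++ [req])) p)
      (acc, acc)
    = (lss.foldl (fun r req_list =>
        if req_list.length ≠ 0 then
          req_list.foldl (fun r req => if r.contains req then r else r ++ [req]) r
        else r) acc,
       lss.foldl (fun r req_list =>
        if req_list.length ≠ 0 then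
          req_list.foldl (fun r req => if r.contains req then r else r ++ [req]) r
        else r) acc) := by
  induction lss generalizing acc with
  | nil => rfl
  | cons ls lss ih =>
    have inner : ∀ (ls : List (List String)) (a : List (List String)),
        ls.foldl (fun p req =>
          if PySem.Set.contains p.1 req then p else (PySem.Set.add p.1 req, p.2 ++ [req])) (a, a)
        = (ls.foldl (fun r req => if r.contains req then r else r ++ [req]) a,
           ls.foldl (fun r req => if r.contains req then r else r ++ [req]) a) := by
      intro ls
      induction ls with
      | nil => intro a; rfl
      | cons x xs ihx =>
        intro a
        by_cases h : a.contains x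
        · simp only [List.foldl_cons, PySem.Set.contains, h, if_true]
          exact ihx a
        · simp only [List.foldl_cons, PySem.Set.contains, h, if_false,
            PySem.Set.add, Bool.false_eq_true]
          exact ihx (a ++ [x])
    simp only [List.foldl_cons]
    by_cases h : ls.length ≠ 0
    · rw [if_pos h, inner ls acc]
      exact ih _
    · have hnil : ls = [] := List.eq_nil_of_length_eq_zero (by omega)
      subst hnil
      simp only [if_neg h, List.foldl_nil]
      exact ih acc

-- one memoizing step of the occ-building loop
def occStep (keys : List String) (occ : PySem.Dict String (PySem.Set String)) (state : String) :
    PySem.Dict String (PySem.Set String) :=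
  if (occ.get? state).isSome then occ
  else occ.insert state (canonS keys state)

-- canonicity: every value the occ loop stores is the canonical index set of its key
theorem occStep_canon (keys : List String) (st : String) (d : PySem.Dict String (PySem.Set String))
    (hd : ∀ s v, d.get? s = some v → v = canonS keys s) :
    ∀ s v, (occStep keys d st).get? s = some v → v = canonS keys s := by
  intro s v hv
  unfold occStep at hv
  split_ifs at hv with h
  · exact hd s v hv
  · rw [PySem.Dict.get?_insert] at hv
    split_ifs at hv with hs
    · subst hs; injection hv with hv; exact hv.symm
    · exact hd s v hv

theorem occReq_canon (keys : List String) (req : List String)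
    (d : PySem.Dict String (PySem.Set String))
    (hd : ∀ s v, d.get? s = some v → v = canonS keys s) :
    ∀ s v, (req.foldl (occStep keys) d).get? s = some v → v = canonS keys s := by
  induction req generalizing d with
  | nil => exact hd
  | cons st req ih => exact ih (occStep keys d st) (occStep_canon keys st d hd)

theorem occ_canon (keys : List String) (reqs : List (List String))
    (d : PySem.Dict String (PySem.Set String))
    (hd : ∀ s v, d.get? s = some v → v = canonS keys s) :
    ∀ s v, (reqs.foldl (fun occ req => req.foldl (occStep keys) occ) d).get? s = some v →
      v = canonS keys s := by
  induction reqs generalizing d with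
  | nil => exact hd
  | cons req reqs ih => exact ih _ (occReq_canon keys req d hd)

-- presence: once a state is memoized it stays, and every state of a processed requirement is memoized
theorem occStep_mono (keys : List String) (d : PySem.Dict String (PySem.Set String))
    (st s : String) (h : (d.get? s).isSome) : ((occStep keys d st).get? s).isSome := by
  unfold occStep
  split_ifs with hst
  · exact h
  · rw [PySem.Dict.get?_insert]
    split_ifs with hs
    · rfl
    · exact h

theorem occStep_self (keys : List String) (d : PySem.Dict String (PySem.Set String))
    (st : String) : ((occStep keys d st).get? st).isSome := by
  unfold occStep
  split_ifs with h
  · exact h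
  · rw [PySem.Dict.get?_insert_self]; rfl

theorem occReq_mono (keys : List String) (req : List String)
    (d : PySem.Dict String (PySem.Set String)) (s : String) (h : (d.get? s).isSome) :
    ((req.foldl (occStep keys) d).get? s).isSome := by
  induction req generalizing d with
  | nil => exact h
  | cons st req ih => exact ih _ (occStep_mono keys d st s h)

theorem occReqs_mono (keys : List String) (reqs : List (List String))
    (d : PySem.Dict String (PySem.Set String)) (s : String) (h : (d.get? s).isSome) :
    ((reqs.foldl (fun occ req => req.foldl (occStep keys) occ) d).get? s).isSome := by
  induction reqs generalizing d with
  | nil => exact h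
  | cons r reqs ih => exact ih _ (occReq_mono keys r d s h)

theorem occReq_self (keys : List String) (req : List String)
    (d : PySem.Dict String (PySem.Set String)) (s : String) (hs : s ∈ req) :
    ((req.foldl (occStep keys) d).get? s).isSome := by
  induction req generalizing d with
  | nil => cases hs
  | cons st req ih =>
    rcases List.mem_cons.mp hs with h | h
    · subst h
      exact occReq_mono keys req _ s (occStep_self keys d s)
    · exact ih _ h

theorem occ_total (keys : List String) (reqs : List (List String))
    (d : PySem.Dict String (PySem.Set String)) :
    ∀ req ∈ reqs, ∀ s ∈ req, ((reqs.foldl (fun occ req => req.foldl (occStep keys) occ) d).get? s).isSome := by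
  induction reqs generalizing d with
  | nil => intro req h; cases h
  | cons r reqs ih =>
    intro req hreq s hs
    rcases List.mem_cons.mp hreq with h | h
    · subst h
      rw [List.foldl_cons]
      exact occReqs_mono keys reqs _ s (occReq_self keys req d s hs)
    · exact ih _ req h s hs

-- one candidate-filter step through a canonical index set
theorem filter_step (keys : List String) (q : String → Bool) (state : String) :
    (keys.filter q).filter (fun k => PySem.Set.contains (canonS keys state) k)
    = keys.filter (fun k => q k && PySem.Str.isIn state k) := by
  rw [List.filter_filter]
  apply List.filter_congr
  intro k hk
  have hmain : PySem.Set.contains (canonS keys state) k = PySem.Str.isIn state k := by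
    unfold canonS
    cases hIn : PySem.Str.isIn state k
    · refine Bool.eq_false_iff.mpr ?_
      intro hc
      have hm := (PySem.Set.mem_ofList _ _).mp ((PySem.Set.contains_iff _ _).mp hc)
      have := (List.mem_filter.mp hm).2
      rw [hIn] at this
      cases this
    · exact (PySem.Set.contains_iff _ _).mpr
        ((PySem.Set.mem_ofList _ _).mpr (List.mem_filter.mpr ⟨hk, hIn⟩))
  rw [hmain, Bool.and_comm]

-- B's progressive filtering through canonical sets computes A's all-states test
theorem filter_chain (keys : List String) (req : List String) (q : String → Bool) :
    req.foldl (fun cand state => cand.filter (fun k => PySem.Set.contains (canonS keys state) k))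
      (keys.filter q)
    = keys.filter (fun k => q k && req.all (fun state => PySem.Str.isIn state k)) := by
  induction req generalizing q with
  | nil => simp
  | cons st req ih =>
    rw [List.foldl_cons, filter_step keys q st, ih (fun k => q k && PySem.Str.isIn st k)]
    apply List.filter_congr
    intro k _
    simp [Bool.and_assoc]

theorem filter_chain0 (keys : List String) (req : List String) :
    req.foldl (fun cand state => cand.filter (fun k => PySem.Set.contains (canonS keys state) k)) keys
    = keys.filter (fun k => req.all (fun state => PySem.Str.isIn state k)) := by
  have h := filter_chain keys req (fun _ => true)
  rw [List.filter_true] at h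
  simpa using h

-- A's inner scan over the keys for one requirement is the cleaned matching keys
theorem tempA_eq (r : List String) (keys : List String) :
    keys.foldl (fun tempPCList PC =>
      if r.all (fun state => PySem.Str.isIn state PC) then
        let PC1 := PySem.Str.replace PC "[" ""
        let PC2 := PySem.Str.replace PC1 "]" ""
        let PC3 := PySem.Str.replace PC2 " " ""
        let PCs := (PySem.Chars.splitOn PC3.toList [',']).map String.ofList
        tempPCList ++ [PCs]
      else tempPCList) []
    = (keys.filter (fun PC => r.all (fun state => PySem.Str.isIn state PC))).map cleanKey :=
  (PySem.List.foldl_append_if (fun PC => r.all (fun state => PySem.Str.isIn state PC))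
    cleanKey keys []).trans (List.nil_append _)

-- ===== VERDICT =====
theorem requirementToPrimeCompatiblesDict_spec : Claim_equal_requirementToPrimeCompatiblesDict := by
  intro pcs _
  unfold Spec_requirementToPrimeCompatiblesDict
  simp only [requirementToPrimeCompatiblesDict, requirementToPrimeCompatiblesDict_alt]
  rw [show (PySem.Set.empty : PySem.Set (List String)) = ([] : List (List String)) from rfl]
  rw [dedup_pair_eq (pcs.map (·.2)) []]
  set keys := pcs.map (·.1) with hkeys
  set reqs := (pcs.map (·.2)).foldl (fun r req_list =>
      if req_list.length ≠ 0 then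
        req_list.foldl (fun r req => if r.contains req then r else r ++ [req]) r
      else r) [] with hreqs
  set occ := reqs.foldl (fun occ req =>
      req.foldl (fun occ state =>
        if (occ.get? state).isSome then occ
        else occ.insert state (PySem.Set.ofList (keys.filter (fun k => PySem.Str.isIn state k)))) occ)
      PySem.Dict.empty with hocc
  have hocc' : occ = reqs.foldl (fun occ req => req.foldl (occStep keys) occ) PySem.Dict.empty := hocc
  have hempty : ∀ (s : String) (v : PySem.Set String),
      (PySem.Dict.empty : PySem.Dict String (PySem.Set String)).get? s = some v → v = canonS keys s := by
    intro s v h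
    simp [PySem.Dict.get?, PySem.Dict.empty] at h
  have hlookup : ∀ req ∈ reqs, ∀ s ∈ req, (occ.get? s).getD PySem.Set.empty = canonS keys s := by
    intro req hreq s hs
    have htot := occ_total keys reqs PySem.Dict.empty req hreq s hs
    rw [← hocc'] at htot
    obtain ⟨v, hv⟩ := Option.isSome_iff_exists.mp htot
    have hcan := occ_canon keys reqs PySem.Dict.empty hempty s v (by rw [← hocc']; exact hv)
    rw [hv, Option.getD_some, hcan]
  congr 1
  apply PySem.List.foldl_congr_mem'
  intro req hreq d
  congr 1
  have hc : req.foldl (fun cand state =>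
      cand.filter (fun k => PySem.Set.contains ((occ.get? state).getD PySem.Set.empty) k)) keys
      = req.foldl (fun cand state =>
      cand.filter (fun k => PySem.Set.contains (canonS keys state) k)) keys := by
    apply PySem.List.foldl_congr_mem'
    intro s hs cand
    rw [hlookup req hreq s hs]
  rw [tempA_eq req keys, hc, filter_chain0 keys req]
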